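-- pv_equiv track=rewrite | github.com/lynnlau/upgrade | client/client (698).py | fcs16
-- ===== SOURCE A (Python) =====
-- def fcs16(data):
--     b=0
--     v=0
--     P=0x8408
--     fcstab=[]
--     fcs=0xffff
--     for b in range(0,256):
--         v=b;
--         for i in range(0,8):
--             v = (v >> 1) ^ P if v & 1 else v >> 1
--         fcstab += [v]
--
--     while data:
--         fcs=(fcs >> 8) ^ fcstab[(fcs ^ data[0]) & 0xff]
--         data = data[1:]
--     fcs ^= 0xffff
--     return [fcs&0xff]+[fcs>>8]
-- ===== SOURCE B (Python) =====
-- def _crc_byte(x):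
--     # process one byte's worth of CRC bit-shifts (CCITT, poly 0x8408)
--     for _ in range(8):
--         x = (x >> 1) ^ 0x8408 if x & 1 else x >> 1
--     return x
--
-- def fcs16(data):
--     fcs = 0xffff
--     for byte in data:
--         fcs = (fcs >> 8) ^ _crc_byte((fcs ^ byte) & 0xff)
--     fcs ^= 0xffff
--     return [fcs & 0xff, fcs >> 8]
-- ===== Notes on version B (the rewrite author's own statement) =====
-- stated objective: faster
-- what changed: B drops A's 256-entry table precomputation and A's repeated list slicing (data = data[1:]) and instead iterates over the bytes directly, computing each byte's 8 CRC bit-shifts on demand.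
import Mathlib
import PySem

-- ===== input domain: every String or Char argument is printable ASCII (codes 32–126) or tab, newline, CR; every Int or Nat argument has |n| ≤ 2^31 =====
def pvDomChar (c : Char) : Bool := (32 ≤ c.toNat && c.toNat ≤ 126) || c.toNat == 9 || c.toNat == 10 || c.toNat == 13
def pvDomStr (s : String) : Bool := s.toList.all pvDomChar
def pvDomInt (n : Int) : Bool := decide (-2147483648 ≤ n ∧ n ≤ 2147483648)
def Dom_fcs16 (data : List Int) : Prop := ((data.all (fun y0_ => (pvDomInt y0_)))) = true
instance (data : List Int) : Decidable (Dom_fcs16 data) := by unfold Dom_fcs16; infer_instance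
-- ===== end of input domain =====

-- B drops A's table precomputation and list slicing: one direct pass over the bytes (return value only; A consumes its local binding, no caller-visible mutation).

-- ===== PORT A =====
-- the 'while data:' loop: data[0] is consumed, data = data[1:]
def fcs16Loop (fcstab : List Int) : List Int → Int → Int
  | [], fcs => fcs
  | d :: rest, fcs =>
      fcs16Loop fcstab rest
        (PySem.Int.bxor (fcs >>> (8 : Nat))
          (PySem.List.pyGetD fcstab (PySem.Int.band (PySem.Int.bxor fcs d) 0xff) 0))

def fcs16 (data : List Int) : List Int :=
  let P : Int := 0x8408
  let fcstab : List Int :=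
    (PySem.List.pyRange 0 256 1).foldl
      (fun tab b =>
        tab ++ [(PySem.List.pyRange 0 8 1).foldl
          (fun v _ => if PySem.Int.band v 1 ≠ 0 then PySem.Int.bxor (v >>> (1 : Nat)) P
                      else v >>> (1 : Nat)) b])
      []
  let fcs := fcs16Loop fcstab data 0xffff
  let fcs := PySem.Int.bxor fcs 0xffff
  [PySem.Int.band fcs 0xff] ++ [fcs >>> (8 : Nat)]

-- ===== PORT B =====
def fcs16CrcByte (x0 : Int) : Int :=
  (PySem.List.pyRange 0 8 1).foldl
    (fun x _ => if PySem.Int.band x 1 ≠ 0 then PySem.Int.bxor (x >>> (1 : Nat)) 0x8408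
                else x >>> (1 : Nat)) x0

def fcs16_alt (data : List Int) : List Int :=
  let fcs := data.foldl
    (fun fcs byte =>
      PySem.Int.bxor (fcs >>> (8 : Nat))
        (fcs16CrcByte (PySem.Int.band (PySem.Int.bxor fcs byte) 0xff))) 0xffff
  let fcs := PySem.Int.bxor fcs 0xffff
  [PySem.Int.band fcs 0xff, fcs >>> (8 : Nat)]

-- ===== PRECONDITION & SPEC =====
def Spec_fcs16 (data : List Int) (out : List Int) : Prop := out = fcs16_alt data
instance (data : List Int) (out : List Int) : Decidable (Spec_fcs16 data out) := by unfold Spec_fcs16; infer_instance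

-- ===== CLAIM (what is proved, stated in full; the proofs are below) =====
def Claim_equal_fcs16 : Prop := ∀ (data : List Int), Dom_fcs16 data → Spec_fcs16 data (fcs16 data)

-- ===== LEMMAS AND PROOFS =====

-- any Int masked with 0xff lies in [0, 256)
theorem band_ff_bounds (a : Int) : 0 ≤ PySem.Int.band a 0xff ∧ PySem.Int.band a 0xff < 256 := by
  unfold PySem.Int.band
  have h255 : (0xff : Int).toNat = 255 := rfl
  rw [h255]
  norm_num
  split_ifs with h1
  · have := Nat.and_le_right (n := a.toNat) (m := 255); omega
  · have := Nat.sub_le 255 (255 &&& (-a - 1).toNat); omega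

-- A's table is the pointwise map of the 8-round bit loop over range(256)
theorem table_eq :
    ((PySem.List.pyRange 0 256 1).foldl
      (fun tab b =>
        tab ++ [(PySem.List.pyRange 0 8 1).foldl
          (fun v _ => if PySem.Int.band v 1 ≠ 0 then PySem.Int.bxor (v >>> (1 : Nat)) 0x8408
                      else v >>> (1 : Nat)) b])
      []) = (PySem.List.pyRange 0 256 1).map fcs16CrcByte := by
  rw [PySem.List.foldl_append_singleton_eq_map]
  rfl

theorem table_lookup (t : Int) (h0 : 0 ≤ t) (h1 : t < 256) :
    PySem.List.pyGetD ((PySem.List.pyRange 0 256 1).map fcs16CrcByte) t 0 = fcs16CrcByte t := by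
  exact PySem.List.pyGetD_map_pyRange_of_nonneg fcs16CrcByte 256 t 0 h0 h1

theorem loop_eq_foldl (data : List Int) (fcs : Int) :
    fcs16Loop ((PySem.List.pyRange 0 256 1).map fcs16CrcByte) data fcs =
      data.foldl
        (fun fcs byte =>
          PySem.Int.bxor (fcs >>> (8 : Nat))
            (fcs16CrcByte (PySem.Int.band (PySem.Int.bxor fcs byte) 0xff))) fcs := by
  induction data generalizing fcs with
  | nil => rfl
  | cons d rest ih =>
      have hb := band_ff_bounds (PySem.Int.bxor fcs d)
      simp only [fcs16Loop, List.foldl_cons, table_lookup _ hb.1 hb.2, ih]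

-- ===== VERDICT (by name: the statement is the Claim_ definition above) =====
theorem fcs16_spec : Claim_equal_fcs16 := by
  intro data _
  show fcs16 data = fcs16_alt data
  unfold fcs16 fcs16_alt
  simp only [table_eq, loop_eq_foldl]
  rfl
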